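-- pv_equiv track=rewrite | github.com/nnmware/nnmware | apps/booking/widgets.py | columnize
-- ===== SOURCE A (Python) =====
-- import math
--
-- def columnize(items, columns):
--     """
--     Return a list containing numbers of elements per column if `items` items
--     are to be divided into `columns` columns.
--     columnize(10, 3)
--     [4, 3, 3]
--     columnize(3, 4)
--     [1, 1, 1, 0]
--     """
--     elts_per_column = []
--     for col in range(columns):
--         col_size = int(math.ceil(float(items) / columns))
--         elts_per_column.append(col_size)
--         items -= col_size
--         columns -= 1
--     return elts_per_column
-- ===== SOURCE B (Python) =====
-- def columnize(items, columns):
--     """Closed-form split: first r columns get q+1 items, the rest q."""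
--     if columns <= 0:
--         return []
--     q, r = divmod(items, columns)
--     return [q + 1 if i < r else q for i in range(columns)]
-- ===== Notes on version B (the rewrite author's own statement) =====
-- stated objective: simpler
-- what changed: Replaced the stateful loop that recomputes ceil(items/columns) and mutates both variables each iteration with a single divmod and a closed-form comprehension giving the first r columns q+1 and the rest q.
import Mathlib
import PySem

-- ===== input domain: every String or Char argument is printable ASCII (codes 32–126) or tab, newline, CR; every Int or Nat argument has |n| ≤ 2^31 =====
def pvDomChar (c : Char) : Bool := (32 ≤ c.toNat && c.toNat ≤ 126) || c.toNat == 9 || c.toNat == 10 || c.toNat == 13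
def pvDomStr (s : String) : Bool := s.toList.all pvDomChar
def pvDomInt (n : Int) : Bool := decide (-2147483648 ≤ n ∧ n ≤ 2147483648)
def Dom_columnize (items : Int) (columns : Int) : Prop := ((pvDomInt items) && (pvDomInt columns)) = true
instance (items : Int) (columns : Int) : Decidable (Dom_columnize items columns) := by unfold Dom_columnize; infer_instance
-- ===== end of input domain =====

-- B replaces A's stateful ceil-and-subtract loop with one divmod and a closed-form list (simpler).

-- ===== PORT A =====
-- int(math.ceil(float(items) / columns)) for columns > 0: exact ceiling division
-- -((-items) // columns); exact on the domain (|items| ≤ 2^31 ≪ 2^53, so the float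
-- quotient is correctly rounded and its ceil equals the exact ceil).
def columnizeCeil (items cols : Int) : Int := -(PySem.Int.floordiv (-items) cols)

-- the for-loop of A: runs len(range(columns)) times while items and columns mutate
def columnizeLoop : Nat → Int → Int → List Int
  | 0, _, _ => []
  | n + 1, items, cols =>
      let colSize := columnizeCeil items cols
      colSize :: columnizeLoop n (items - colSize) (cols - 1)

def columnize (items : Int) (columns : Int) : List Int :=
  columnizeLoop columns.toNat items columns

-- ===== PORT B =====
def columnize_alt (items : Int) (columns : Int) : List Int :=
  if columns ≤ 0 then []
  else
    let q := PySem.Int.floordiv items columns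
    let r := PySem.Int.mod items columns
    (List.range columns.toNat).map (fun (i : Nat) => if (i : Int) < r then q + 1 else q)

-- ===== PRECONDITION & SPEC =====
def Spec_columnize (items : Int) (columns : Int) (out : List Int) : Prop := out = columnize_alt items columns
instance (items : Int) (columns : Int) (out : List Int) : Decidable (Spec_columnize items columns out) := by unfold Spec_columnize; infer_instance

-- ===== CLAIM (what is proved, stated in full; the proofs are below) =====
def Claim_equal_columnize : Prop := ∀ (items : Int) (columns : Int), Dom_columnize items columns → Spec_columnize items columns (columnize items columns)

-- ===== LEMMAS AND PROOFS =====

theorem columnizeCeil_eq (items cols : Int) (h : 0 < cols) :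
    columnizeCeil items cols =
      PySem.Int.floordiv items cols + (if 0 < PySem.Int.mod items cols then 1 else 0) := by
  have hqr := PySem.Int.floordiv_mul_add_mod items cols
  have hr0 := PySem.Int.mod_nonneg items h
  have hrlt := PySem.Int.mod_lt items h
  set q := PySem.Int.floordiv items cols with hq
  set r := PySem.Int.mod items cols with hrdef
  unfold columnizeCeil
  by_cases hr : 0 < r
  · simp only [hr, if_pos]
    rw [show -(PySem.Int.floordiv (-items) cols) = q + 1 ↔ _ from
      PySem.Int.neg_floordiv_neg_eq_iff_of_pos h]
    constructor <;> nlinarith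
  · simp only [hr, if_neg, not_false_iff, add_zero]
    have hr0' : r = 0 := le_antisymm (by omega) hr0
    rw [show -(PySem.Int.floordiv (-items) cols) = q ↔ _ from
      PySem.Int.neg_floordiv_neg_eq_iff_of_pos h]
    constructor <;> nlinarith

theorem columnizeLoop_eq (n : Nat) : ∀ (items : Int),
    columnizeLoop n items (n : Int) =
      (List.range n).map (fun (i : Nat) =>
        if (i : Int) < PySem.Int.mod items (n : Int)
        then PySem.Int.floordiv items (n : Int) + 1
        else PySem.Int.floordiv items (n : Int)) := by
  induction n with
  | zero => intro items; simp [columnizeLoop]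
  | succ n ih =>
    intro items
    have hcpos : (0 : Int) < ((n : Int) + 1) := by omega
    have hqr := PySem.Int.floordiv_mul_add_mod items ((n : Int) + 1)
    have hr0 := PySem.Int.mod_nonneg items hcpos
    have hrlt := PySem.Int.mod_lt items hcpos
    set q := PySem.Int.floordiv items ((n : Int) + 1) with hq
    set r := PySem.Int.mod items ((n : Int) + 1) with hrdef
    have hcast : ((n + 1 : Nat) : Int) = (n : Int) + 1 := by push_cast; ring
    have hceil : columnizeCeil items ((n : Int) + 1) = q + (if 0 < r then 1 else 0) := by
      rw [columnizeCeil_eq items _ hcpos]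
    -- unfold one loop step
    show columnizeLoop (n + 1) items ((n + 1 : Nat) : Int) = _
    rw [hcast]
    unfold columnizeLoop
    simp only [hceil]
    rw [show (n : Int) + 1 - 1 = (n : Int) by ring]
    rw [List.range_succ_eq_map, List.map_cons, List.map_map]
    refine List.cons_eq_cons.mpr ⟨?_, ?_⟩
    · -- head: f 0
      simp only [Nat.cast_zero, ← hq, ← hrdef]
      by_cases hr : 0 < r <;> simp [hr]
    · -- tail
      rcases Nat.eq_zero_or_pos n with hn | hn
      · subst hn; simp [columnizeLoop]
      have hnpos : (0 : Int) < (n : Int) := by exact_mod_cast hn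
      rw [ih]
      apply List.map_congr_left
      intro i hi
      by_cases hr : 0 < r
      · -- c = q + 1; new remainder r - 1, quotient q
        have hq' : PySem.Int.floordiv (items - (q + (if 0 < r then 1 else 0))) (n : Int) = q := by
          rw [if_pos hr]
          rw [PySem.Int.floordiv_eq_iff_of_pos hnpos]
          constructor <;> nlinarith
        have hr' : PySem.Int.mod (items - (q + (if 0 < r then 1 else 0))) (n : Int) = r - 1 := by
          have := PySem.Int.floordiv_mul_add_mod (items - (q + (if 0 < r then 1 else 0))) (n : Int)
          rw [hq'] at this
          rw [if_pos hr] at this ⊢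
          nlinarith
        rw [hq', hr']
        simp only [Function.comp_apply, ← hq, ← hrdef, Nat.succ_eq_add_one]
        push_cast
        split_ifs <;> omega
      · -- r = 0; c = q; new remainder 0, quotient q
        have hr0' : r = 0 := le_antisymm (by omega) hr0
        have hq' : PySem.Int.floordiv (items - (q + (if 0 < r then 1 else 0))) (n : Int) = q := by
          rw [if_neg hr]
          rw [PySem.Int.floordiv_eq_iff_of_pos hnpos]
          constructor <;> nlinarith
        have hr' : PySem.Int.mod (items - (q + (if 0 < r then 1 else 0))) (n : Int) = 0 := by
          have := PySem.Int.floordiv_mul_add_mod (items - (q + (if 0 < r then 1 else 0))) (n : Int)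
          rw [hq'] at this
          rw [if_neg hr] at this ⊢
          nlinarith
        rw [hq', hr']
        simp only [Function.comp_apply, ← hq, ← hrdef, Nat.succ_eq_add_one]
        push_cast
        split_ifs <;> omega

-- ===== VERDICT (by name: the statement is the Claim_ definition above) =====
theorem columnize_spec : Claim_equal_columnize := by
  intro items columns _
  unfold Spec_columnize columnize columnize_alt
  by_cases hc : columns ≤ 0
  · have : columns.toNat = 0 := by omega
    simp [this, hc, columnizeLoop]
  · have hpos : 0 < columns := by omega
    have hcast : (columns.toNat : Int) = columns := by omega
    rw [if_neg hc]
    have h := columnizeLoop_eq columns.toNat items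
    rw [hcast] at h
    rw [h]
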